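-- pv_equiv track=rewrite | github.com/StevenXoFk/Tarea-taller-Tkinter | convertidor.py | base3_a_base3
-- ===== SOURCE A (Python) =====
-- def base3_a_base3(numero):
--     decimal = 0
--     exponente = 0
--
--     while numero > 0:
--         digitos = numero % 10
--         decimal += digitos * (3 ** exponente)
--         numero //= 10
--         exponente += 1
--
--     binario = 0
--     valor = 1
--     while decimal > 0:
--         todo = decimal % 3
--         binario += todo * valor
--         decimal //= 3
--         valor *= 10
--
--     return binario
-- ===== SOURCE B (Python) =====
-- def base3_a_base3(numero):
--     # single carry-propagating pass over the decimal digits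
--     resultado = 0
--     lugar = 1
--     acarreo = 0
--     while numero > 0:
--         total = numero % 10 + acarreo
--         resultado += (total % 3) * lugar
--         acarreo = total // 3
--         numero //= 10
--         lugar *= 10
--     while acarreo > 0:
--         resultado += (acarreo % 3) * lugar
--         acarreo //= 3
--         lugar *= 10
--     return resultado
-- ===== Notes on version B (the rewrite author's own statement) =====
-- stated objective: alternative
-- what changed: Replaces A's two loops (decode digits into an intermediate base-3 value, then re-encode it digit by digit) with a single carry-propagating pass over the decimal digits plus a short trailing loop that drains the carry; the intermediate decimal value disappears.
import Mathlib
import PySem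

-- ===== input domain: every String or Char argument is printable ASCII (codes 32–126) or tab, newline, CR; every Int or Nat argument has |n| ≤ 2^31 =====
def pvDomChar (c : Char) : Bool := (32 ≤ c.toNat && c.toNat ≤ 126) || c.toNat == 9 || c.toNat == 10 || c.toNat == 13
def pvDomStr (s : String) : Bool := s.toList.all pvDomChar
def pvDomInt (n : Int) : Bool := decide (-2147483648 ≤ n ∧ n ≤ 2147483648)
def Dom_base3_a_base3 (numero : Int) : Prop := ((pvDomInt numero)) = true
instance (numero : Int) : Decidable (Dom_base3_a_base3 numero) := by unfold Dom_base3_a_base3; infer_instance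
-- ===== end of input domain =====

-- B replaces A's decode-then-reencode pair of loops by one carry-propagating pass; objective: alternative (same cost).

-- termination helper cited by the ports' decreasing_by
theorem pv_fd_lt (n b : Int) (hn : 0 < n) (hb : 1 < b) : (PySem.Int.floordiv n b).toNat < n.toNat := by
  rw [PySem.Int.floordiv_eq_ediv_of_pos (by omega)]
  have h2 : n / b < n := by
    rw [Int.ediv_lt_iff_lt_mul (by omega)]
    nlinarith
  have h3 : 0 ≤ n / b := Int.ediv_nonneg (by omega) (by omega)
  omega

-- ===== PORT A =====
-- first while loop of A: accumulate 'decimal'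
def base3DecLoop (numero decimal exponente : Int) : Int :=
  if numero > 0 then
    base3DecLoop (PySem.Int.floordiv numero 10)
      (decimal + PySem.Int.mod numero 10 * 3 ^ exponente.toNat) (exponente + 1)
  else decimal
termination_by numero.toNat
decreasing_by exact pv_fd_lt _ _ (by omega) (by omega)

-- second while loop of A: write 'decimal' out in base 3
def base3EncLoop (decimal binario valor : Int) : Int :=
  if decimal > 0 then
    base3EncLoop (PySem.Int.floordiv decimal 3)
      (binario + PySem.Int.mod decimal 3 * valor) (valor * 10)
  else binario
termination_by decimal.toNat
decreasing_by exact pv_fd_lt _ _ (by omega) (by omega)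

def base3_a_base3 (numero : Int) : Int :=
  base3EncLoop (base3DecLoop numero 0 0) 0 1

-- ===== PORT B =====
-- trailing loop of B: drain the carry
def base3CarryLoop (acarreo lugar resultado : Int) : Int :=
  if acarreo > 0 then
    base3CarryLoop (PySem.Int.floordiv acarreo 3) (lugar * 10)
      (resultado + PySem.Int.mod acarreo 3 * lugar)
  else resultado
termination_by acarreo.toNat
decreasing_by exact pv_fd_lt _ _ (by omega) (by omega)

-- main loop of B: one pass over the decimal digits, propagating a carry
def base3MainLoop (numero acarreo lugar resultado : Int) : Int :=
  if numero > 0 then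
    let total := PySem.Int.mod numero 10 + acarreo
    base3MainLoop (PySem.Int.floordiv numero 10) (PySem.Int.floordiv total 3)
      (lugar * 10) (resultado + PySem.Int.mod total 3 * lugar)
  else base3CarryLoop acarreo lugar resultado
termination_by numero.toNat
decreasing_by exact pv_fd_lt _ _ (by omega) (by omega)

def base3_a_base3_alt (numero : Int) : Int :=
  base3MainLoop numero 0 1 0

-- ===== PRECONDITION & SPEC =====
def Spec_base3_a_base3 (numero : Int) (out : Int) : Prop := out = base3_a_base3_alt numero
instance (numero : Int) (out : Int) : Decidable (Spec_base3_a_base3 numero out) := by unfold Spec_base3_a_base3; infer_instance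

-- ===== CLAIM (what is proved, stated in full; the proofs are below) =====
def Claim_equal_base3_a_base3 : Prop := ∀ (numero : Int), Dom_base3_a_base3 numero → Spec_base3_a_base3 numero (base3_a_base3 numero)

-- ===== LEMMAS AND PROOFS =====

-- proof-side: the value A's first loop accumulates (decimal digits read as base-3 digits)
def pvVal (n : Int) : Int :=
  if n > 0 then PySem.Int.mod n 10 + 3 * pvVal (PySem.Int.floordiv n 10) else 0
termination_by n.toNat
decreasing_by exact pv_fd_lt _ _ (by omega) (by omega)

-- proof-side: divisor-3 skeleton, used only for its induction principle pvE.induct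
def pvE (x : Int) : Int :=
  if x > 0 then PySem.Int.mod x 3 + 10 * pvE (PySem.Int.floordiv x 3) else 0
termination_by x.toNat
decreasing_by exact pv_fd_lt _ _ (by omega) (by omega)

theorem pvVal_nonneg (n : Int) : 0 ≤ pvVal n := by
  induction n using pvVal.induct with
  | case1 n h ih =>
    rw [pvVal, if_pos h]
    have := PySem.Int.mod_nonneg n (b := 10) (by omega)
    omega
  | case2 n h => rw [pvVal, if_neg h]

theorem decLoop_eq (n : Int) : ∀ d e : Int, 0 ≤ e →
    base3DecLoop n d e = d + 3 ^ e.toNat * pvVal n := by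
  induction n using pvVal.induct with
  | case1 n h ih =>
    intro d e he
    rw [base3DecLoop, if_pos h, pvVal, if_pos h, ih _ _ (by omega)]
    have h1 : (e + 1).toNat = e.toNat + 1 := by omega
    rw [h1, pow_succ]
    ring
  | case2 n h =>
    intro d e he
    rw [base3DecLoop, if_neg h, pvVal, if_neg h]
    ring

-- the canonical base-3 writer is E d := base3EncLoop d 0 1; scaling law for shifted accumulators
theorem encLoop_scale (d : Int) : ∀ b v : Int,
    base3EncLoop d b v = b + v * base3EncLoop d 0 1 := by
  induction d using pvE.induct with
  | case1 d h ih =>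
    intro b v
    rw [base3EncLoop, if_pos h, ih]
    conv_rhs => rw [base3EncLoop, if_pos h]
    rw [ih (0 + PySem.Int.mod d 3 * 1) (1 * 10)]
    ring
  | case2 d h =>
    intro b v
    rw [base3EncLoop, if_neg h, base3EncLoop, if_neg h]
    ring

-- one unfolding of E at a nonnegative argument
theorem enc_step (x : Int) (hx : 0 ≤ x) :
    base3EncLoop x 0 1 = PySem.Int.mod x 3 + 10 * base3EncLoop (PySem.Int.floordiv x 3) 0 1 := by
  by_cases h : x > 0
  · rw [base3EncLoop, if_pos h, encLoop_scale]
    ring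
  · have hx0 : x = 0 := by omega
    subst hx0
    have e1 : PySem.Int.floordiv (0 : Int) 3 = (0 : Int) := by decide
    have e2 : PySem.Int.mod (0 : Int) 3 = (0 : Int) := by decide
    rw [e1, e2, base3EncLoop, if_neg (show ¬ (0 : Int) > 0 by omega)]
    ring

-- B's carry-drain loop is A's encoder, shifted by resultado and lugar
theorem carryLoop_eq (c : Int) : ∀ p r : Int,
    base3CarryLoop c p r = r + p * base3EncLoop c 0 1 := by
  induction c using pvE.induct with
  | case1 c h ih =>
    intro p r
    rw [base3CarryLoop, if_pos h, ih]
    conv_rhs => rw [base3EncLoop, if_pos h]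
    rw [encLoop_scale _ (0 + PySem.Int.mod c 3 * 1) (1 * 10)]
    ring
  | case2 c h =>
    intro p r
    rw [base3CarryLoop, if_neg h, base3EncLoop, if_neg h]
    ring

-- main invariant: B's fused pass equals writing (pvVal n + carry) in base 3
theorem mainLoop_eq (n : Int) : ∀ c p r : Int, 0 ≤ c →
    base3MainLoop n c p r = r + p * base3EncLoop (pvVal n + c) 0 1 := by
  induction n using pvVal.induct with
  | case1 n h ih =>
    intro c p r hc
    rw [base3MainLoop, if_pos h]
    set t : Int := PySem.Int.mod n 10 + c with ht
    have htn : 0 ≤ t := by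
      have := PySem.Int.mod_nonneg n (b := 10) (by omega); omega
    have hdiv : 0 ≤ PySem.Int.floordiv t 3 := by
      rw [PySem.Int.floordiv_eq_ediv_of_pos (by omega)]
      exact Int.ediv_nonneg htn (by omega)
    rw [ih _ _ _ hdiv]
    have hv : pvVal n + c = t + 3 * pvVal (PySem.Int.floordiv n 10) := by
      rw [pvVal, if_pos h]; ring
    have hval := pvVal_nonneg (PySem.Int.floordiv n 10)
    have hmod : PySem.Int.mod (pvVal n + c) 3 = PySem.Int.mod t 3 := by
      rw [PySem.Int.mod_eq_emod_of_pos (a := pvVal n + c) (by omega),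
          PySem.Int.mod_eq_emod_of_pos (a := t) (by omega), hv]
      omega
    have hfd : PySem.Int.floordiv (pvVal n + c) 3
        = PySem.Int.floordiv t 3 + pvVal (PySem.Int.floordiv n 10) := by
      rw [PySem.Int.floordiv_eq_ediv_of_pos (a := pvVal n + c) (by omega),
          PySem.Int.floordiv_eq_ediv_of_pos (a := t) (by omega), hv]
      omega
    rw [enc_step (pvVal n + c) (by omega), hmod, hfd]
    have hcomm : PySem.Int.floordiv t 3 + pvVal (PySem.Int.floordiv n 10)
        = pvVal (PySem.Int.floordiv n 10) + PySem.Int.floordiv t 3 := add_comm _ _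
    rw [hcomm]
    ring
  | case2 n h =>
    intro c p r hc
    rw [base3MainLoop, if_neg h, carryLoop_eq, pvVal, if_neg h, zero_add]

-- ===== VERDICT (by name: the statement is the Claim_ definition above) =====
theorem base3_a_base3_spec : Claim_equal_base3_a_base3 := by
  intro numero _
  unfold Spec_base3_a_base3 base3_a_base3 base3_a_base3_alt
  rw [decLoop_eq numero 0 0 le_rfl, mainLoop_eq numero 0 1 0 le_rfl, add_zero]
  simp
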